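-- pv_equiv track=rewrite | github.com/1enzo1/nfe-product-import | scripts/validate_csv_fields.py | find_marker_in_text
-- ===== SOURCE A (Python) =====
-- from typing import Callable, Dict, Iterable, List, Optional, Sequence
--
-- def find_marker_in_text(text: str, markers: Sequence[str]) -> tuple[str | None, int]:
--     lowered = text.casefold()
--     best_idx = -1
--     best_marker: str | None = None
--     for marker in markers:
--         idx = lowered.find(marker)
--         if idx != -1 and (best_idx == -1 or idx < best_idx):
--             best_marker = marker
--             best_idx = idx
--     return best_marker, best_idx
-- ===== SOURCE B (Python) =====
-- def find_marker_in_text(text, markers):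
--     lowered = text.casefold()
--     # Scan text positions left to right; the first position where any marker
--     # starts is the answer, and the first marker (in list order) matching
--     # there is the one A's strict-improvement rule would keep.
--     for i in range(len(lowered) + 1):
--         for marker in markers:
--             if lowered.startswith(marker, i):
--                 return marker, i
--     return None, -1
-- ===== Notes on version B (the rewrite author's own statement) =====
-- stated objective: alternative
-- what changed: B replaces A's per-marker full substring search with a single left-to-right scan over text positions that returns at the first position where any marker starts (first marker in list order wins), which reproduces A's earliest-index, strict-improvement tie-breaking.
import Mathlib
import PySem

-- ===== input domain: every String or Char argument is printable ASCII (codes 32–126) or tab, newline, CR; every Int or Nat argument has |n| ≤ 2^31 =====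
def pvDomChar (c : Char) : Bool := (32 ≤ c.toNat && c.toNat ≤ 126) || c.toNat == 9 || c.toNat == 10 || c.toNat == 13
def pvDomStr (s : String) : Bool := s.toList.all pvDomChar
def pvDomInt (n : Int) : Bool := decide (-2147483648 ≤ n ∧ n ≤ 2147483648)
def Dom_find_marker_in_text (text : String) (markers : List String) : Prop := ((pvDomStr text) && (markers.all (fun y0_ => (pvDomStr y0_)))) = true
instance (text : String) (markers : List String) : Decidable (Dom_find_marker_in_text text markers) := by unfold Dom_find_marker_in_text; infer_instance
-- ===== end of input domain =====

-- B scans text positions left to right and returns at the first position where any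
-- marker starts, instead of running a full substring search per marker; objective:
-- alternative (one left-to-right position scan; not measured faster).


-- ===== PORT A =====
-- text.casefold() is ported as PySem.Chars.lower: casefold and lower coincide on the
-- printable-ASCII domain Dom. lowered.find(marker) is PySem.Chars.find.
def find_marker_in_text (text : String) (markers : List String) : Option String × Int :=
  let lowered := PySem.Chars.lower text.toList
  markers.foldl
    (fun (st : Option String × Int) marker =>
      let idx := PySem.Chars.find lowered marker.toList
      if idx ≠ -1 ∧ (st.2 = -1 ∨ idx < st.2) then (some marker, idx) else st)
    (none, -1)

-- ===== PORT B =====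
-- Inner 'for marker in markers: if lowered.startswith(marker, i): return marker, i'
-- is List.find? over markers; lowered.startswith(marker, i) with 0 ≤ i ≤ len(lowered)
-- is exactly startswith on (drop i). Outer 'for i in range(len(lowered)+1)' is the
-- fuel recursion below (fuel counts the remaining positions).
def altScan (lowered : List Char) (markers : List String) : Nat → Nat → Option String × Int
  | _, 0 => (none, -1)
  | i, fuel+1 =>
    match markers.find? (fun m => PySem.Chars.startswith (lowered.drop i) m.toList) with
    | some m => (some m, (i : Int))
    | none => altScan lowered markers (i+1) fuel

def find_marker_in_text_alt (text : String) (markers : List String) : Option String × Int :=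
  let lowered := PySem.Chars.lower text.toList
  altScan lowered markers 0 (lowered.length + 1)

-- ===== PRECONDITION & SPEC =====
def Spec_find_marker_in_text (text : String) (markers : List String) (out : Option String × Int) : Prop := out = find_marker_in_text_alt text markers
instance (text : String) (markers : List String) (out : Option String × Int) : Decidable (Spec_find_marker_in_text text markers out) := by unfold Spec_find_marker_in_text; infer_instance

-- ===== CLAIM (what is proved, stated in full; the proofs are below) =====
def Claim_equal_find_marker_in_text : Prop := ∀ (text : String) (markers : List String), Dom_find_marker_in_text text markers → Spec_find_marker_in_text text markers (find_marker_in_text text markers)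

-- ===== LEMMAS AND PROOFS =====

-- The common characterisation of both ports' result on lowered text L and marker list M:
-- either no marker occurs and the result is (none, -1), or the result is (some m, find L m)
-- where m's first occurrence is minimal among all markers and strictly earlier than the
-- first occurrence of every marker listed before m.
def IsResult (L : List Char) (M : List String) (out : Option String × Int) : Prop :=
  (out = (none, -1) ∧ ∀ m ∈ M, PySem.Chars.find L m.toList = -1)
  ∨ (∃ m pre suf, out = (some m, PySem.Chars.find L m.toList) ∧ M = pre ++ m :: suf
       ∧ PySem.Chars.find L m.toList ≠ -1
       ∧ (∀ m' ∈ M, PySem.Chars.find L m'.toList ≠ -1 →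
            PySem.Chars.find L m.toList ≤ PySem.Chars.find L m'.toList)
       ∧ (∀ m' ∈ pre, PySem.Chars.find L m'.toList ≠ -1 →
            PySem.Chars.find L m.toList < PySem.Chars.find L m'.toList))

theorem find_nonneg_of_ne {L s : List Char} (h : PySem.Chars.find L s ≠ -1) :
    0 ≤ PySem.Chars.find L s := by
  have := PySem.Chars.neg_one_le_find L s
  omega

-- an occurrence at position i bounds the first occurrence
theorem find_le_of_prefix_drop {L s : List Char} {i : Nat} (h : s <+: L.drop i) :
    0 ≤ PySem.Chars.find L s ∧ PySem.Chars.find L s ≤ (i : Int) := by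
  have hinf : s <:+: L := h.isInfix.trans (List.drop_suffix i L).isInfix
  have h0 : 0 ≤ PySem.Chars.find L s := (PySem.Chars.find_nonneg_iff L s).mpr hinf
  refine ⟨h0, ?_⟩
  have hs := (PySem.Chars.find_spec (s := L) (sub := s) h0).2
  by_contra hlt
  push Not at hlt
  have : i < (PySem.Chars.find L s).toNat := by omega
  exact hs i this h

-- the first occurrence is a real occurrence within the text
theorem prefix_drop_of_find_ne {L s : List Char} (h : PySem.Chars.find L s ≠ -1) :
    s <+: L.drop (PySem.Chars.find L s).toNat ∧ (PySem.Chars.find L s).toNat ≤ L.length := by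
  have h0 := find_nonneg_of_ne h
  refine ⟨(PySem.Chars.find_spec h0).1, ?_⟩
  have := PySem.Chars.find_le_length L s
  omega

theorem step_preserves (L : List Char) (P : List String) (st : Option String × Int)
    (m : String) (h : IsResult L P st) :
    IsResult L (P ++ [m])
      (if PySem.Chars.find L m.toList ≠ -1 ∧
          (st.2 = -1 ∨ PySem.Chars.find L m.toList < st.2)
       then (some m, PySem.Chars.find L m.toList) else st) := by
  rcases h with ⟨hout, hall⟩ | ⟨mb, pre, suf, hout, hM, hne, hmin, hpre⟩
  · subst hout
    by_cases hm : PySem.Chars.find L m.toList = -1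
    · rw [if_neg (by simp [hm])]
      exact Or.inl ⟨rfl, by
        intro m' hm'
        rcases List.mem_append.mp hm' with h' | h'
        · exact hall m' h'
        · simp at h'; subst h'; exact hm⟩
    · rw [if_pos ⟨hm, Or.inl rfl⟩]
      refine Or.inr ⟨m, P, [], rfl, rfl, hm, ?_, ?_⟩
      · intro m' hm' hne'
        rcases List.mem_append.mp hm' with h' | h'
        · exact absurd (hall m' h') hne'
        · simp at h'; subst h'; exact le_refl _
      · intro m' hm' hne'
        exact absurd (hall m' hm') hne'
  · subst hout
    have hb0 : 0 ≤ PySem.Chars.find L mb.toList := find_nonneg_of_ne hne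
    by_cases hc : PySem.Chars.find L m.toList ≠ -1 ∧
        ((PySem.Chars.find L mb.toList : Int) = -1 ∨
          PySem.Chars.find L m.toList < PySem.Chars.find L mb.toList)
    · rw [if_pos hc]
      obtain ⟨hm, hlt⟩ := hc
      have hlt : PySem.Chars.find L m.toList < PySem.Chars.find L mb.toList := by
        rcases hlt with h' | h'
        · omega
        · exact h'
      refine Or.inr ⟨m, P, [], rfl, rfl, hm, ?_, ?_⟩
      · intro m' hm' hne'
        rcases List.mem_append.mp hm' with h' | h'
        · exact le_of_lt (lt_of_lt_of_le hlt (hmin m' h' hne'))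
        · simp at h'; subst h'; exact le_refl _
      · intro m' hm' hne'
        exact lt_of_lt_of_le hlt (hmin m' hm' hne')
    · rw [if_neg hc]
      push Not at hc
      refine Or.inr ⟨mb, pre, suf ++ [m], rfl, by rw [hM]; simp, hne, ?_, hpre⟩
      intro m' hm' hne'
      rcases List.mem_append.mp hm' with h' | h'
      · exact hmin m' h' hne'
      · simp at h'; subst h'
        have := hc hne'
        omega

theorem foldA_spec (L : List Char) :
    ∀ (M P : List String) (st : Option String × Int), IsResult L P st →
      IsResult L (P ++ M)
        (M.foldl
          (fun (st : Option String × Int) marker =>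
            let idx := PySem.Chars.find L marker.toList
            if idx ≠ -1 ∧ (st.2 = -1 ∨ idx < st.2) then (some marker, idx) else st)
          st) := by
  intro M
  induction M with
  | nil => intro P st h; simpa using h
  | cons m M ih =>
    intro P st h
    have h1 := step_preserves L P st m h
    have h2 := ih (P ++ [m]) _ h1
    simpa using h2

theorem altScan_spec (L : List Char) (M : List String) :
    ∀ (fuel i : Nat), i + fuel = L.length + 1 →
      (∀ j, j < i → ∀ m ∈ M, ¬ (m.toList <+: L.drop j)) →
      IsResult L M (altScan L M i fuel) := by
  intro fuel
  induction fuel with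
  | zero =>
    intro i hlen hinv
    refine Or.inl ⟨rfl, ?_⟩
    intro m hm
    by_contra hne
    obtain ⟨hpref, hle⟩ := prefix_drop_of_find_ne hne
    exact hinv _ (by omega) m hm hpref
  | succ fuel ih =>
    intro i hlen hinv
    show IsResult L M (altScan L M i (fuel + 1))
    rw [altScan]
    cases hfind : M.find? (fun m => PySem.Chars.startswith (L.drop i) m.toList) with
    | none =>
      have hnone := List.find?_eq_none.mp hfind
      refine ih (i + 1) (by omega) ?_
      intro j hj m hm hp
      rcases Nat.lt_succ_iff_lt_or_eq.mp hj with h' | h'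
      · exact hinv j h' m hm hp
      · subst h'
        exact hnone m hm (by simpa using (PySem.Chars.startswith_iff _ _).mpr hp)
    | some m =>
      obtain ⟨hpred, pre, suf, hM, hprenot⟩ := List.find?_eq_some_iff_append.mp hfind
      have hmmem : m ∈ M := by rw [hM]; simp
      have hmatch : m.toList <+: L.drop i := (PySem.Chars.startswith_iff _ _).mp hpred
      obtain ⟨h0, hle⟩ := find_le_of_prefix_drop hmatch
      have hfi : PySem.Chars.find L m.toList = (i : Int) := by
        by_contra hne'
        have hne : PySem.Chars.find L m.toList ≠ -1 := by omega
        obtain ⟨hpref, _⟩ := prefix_drop_of_find_ne hne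
        have hlt : (PySem.Chars.find L m.toList).toNat < i := by omega
        exact hinv _ hlt m hmmem hpref
      refine Or.inr ⟨m, pre, suf, by rw [hfi], hM, by omega, ?_, ?_⟩
      · intro m' hm' hne'
        obtain ⟨hpref, _⟩ := prefix_drop_of_find_ne hne'
        have h0' := find_nonneg_of_ne hne'
        have : ¬ (PySem.Chars.find L m'.toList).toNat < i := fun hlt =>
          hinv _ hlt m' hm' hpref
        omega
      · intro m' hm' hne'
        obtain ⟨hpref, _⟩ := prefix_drop_of_find_ne hne'
        have h0' := find_nonneg_of_ne hne'
        have hnotlt : ¬ (PySem.Chars.find L m'.toList).toNat < i := fun hlt =>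
          hinv _ hlt m' (by rw [hM]; exact List.mem_append.mpr (Or.inl hm')) hpref
        have hnoteq : (PySem.Chars.find L m'.toList).toNat ≠ i := by
          intro he
          have : m'.toList <+: L.drop i := by rw [← he]; exact hpref
          have hff : PySem.Chars.startswith (L.drop i) m'.toList = false := by
            simpa using hprenot m' hm'
          exact absurd ((PySem.Chars.startswith_iff _ _).mpr this) (by simp [hff])
        omega

theorem IsResult_unique (L : List Char) (M : List String) (o1 o2 : Option String × Int)
    (h1 : IsResult L M o1) (h2 : IsResult L M o2) : o1 = o2 := by
  rcases h1 with ⟨e1, hall1⟩ | ⟨m1, pre1, suf1, e1, hM1, hne1, hmin1, hpre1⟩ <;>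
    rcases h2 with ⟨e2, hall2⟩ | ⟨m2, pre2, suf2, e2, hM2, hne2, hmin2, hpre2⟩
  · rw [e1, e2]
  · exact absurd (hall1 m2 (by rw [hM2]; simp)) hne2
  · exact absurd (hall2 m1 (by rw [hM1]; simp)) hne1
  · have hmem1 : m1 ∈ M := by rw [hM1]; simp
    have hmem2 : m2 ∈ M := by rw [hM2]; simp
    have hi12 : PySem.Chars.find L m1.toList = PySem.Chars.find L m2.toList :=
      le_antisymm (hmin1 m2 hmem2 hne2) (hmin2 m1 hmem1 hne1)
    have e : pre1 ++ m1 :: suf1 = pre2 ++ m2 :: suf2 := hM1.symm.trans hM2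
    have hm12 : m1 = m2 := by
      rcases lt_trichotomy pre1.length pre2.length with hlt | heq | hgt
      · exfalso
        have hv : (pre1 ++ m1 :: suf1)[pre1.length]? = some m1 := by
          rw [List.getElem?_append_right (le_refl pre1.length)]
          simp
        have hv2 : pre2[pre1.length]? = some m1 := by
          rw [← List.getElem?_append_left (l₂ := m2 :: suf2) hlt, ← e]
          exact hv
        have hm1mem : m1 ∈ pre2 := List.mem_of_getElem? hv2
        have := hpre2 m1 hm1mem hne1
        omega
      · obtain ⟨-, htail⟩ := List.append_inj e heq
        exact (List.cons.injEq _ _ _ _ ▸ htail).1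
      · exfalso
        have hv : (pre2 ++ m2 :: suf2)[pre2.length]? = some m2 := by
          rw [List.getElem?_append_right (le_refl pre2.length)]
          simp
        have hv2 : pre1[pre2.length]? = some m2 := by
          rw [← List.getElem?_append_left (l₂ := m1 :: suf1) hgt, e]
          exact hv
        have hm2mem : m2 ∈ pre1 := List.mem_of_getElem? hv2
        have := hpre1 m2 hm2mem hne2
        omega
    rw [e1, e2, hm12]

-- ===== VERDICT (by name: the statement is the Claim_ definition above) =====
theorem find_marker_in_text_spec : Claim_equal_find_marker_in_text := by
  intro text markers _
  unfold Spec_find_marker_in_text find_marker_in_text find_marker_in_text_alt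
  set L := PySem.Chars.lower text.toList with hL
  have hA : IsResult L markers
      (markers.foldl
        (fun (st : Option String × Int) marker =>
          let idx := PySem.Chars.find L marker.toList
          if idx ≠ -1 ∧ (st.2 = -1 ∨ idx < st.2) then (some marker, idx) else st)
        (none, -1)) := by
    have := foldA_spec L markers [] (none, -1) (Or.inl ⟨rfl, by simp⟩)
    simpa using this
  have hB : IsResult L markers (altScan L markers 0 (L.length + 1)) :=
    altScan_spec L markers (L.length + 1) 0 (by omega) (by intro j hj; omega)
  exact IsResult_unique L markers _ _ hA hB
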